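-- pv_equiv track=rewrite | github.com/opencb/argus | argus/utils.py | dot2python
-- ===== SOURCE A (Python) =====
-- def dot2python(field):
--     z = []
--     for i, item in enumerate(field.split('.')):
--         if i == 0:
--             z.append(item)
--         else:
--             item_split = item.split('[')
--             key = '["{}"]'.format(item_split[0])
--             z.append(key)
--             if len(item_split) > 1:
--                 z.append(item[len(item_split[0]):])
--     return ''.join(z)
-- ===== SOURCE B (Python) =====
-- import re
--
-- def dot2python(field):
--     return re.sub(r'\.([^.\[]*)', r'["\1"]', field)
-- ===== Notes on version B (the rewrite author's own statement) =====
-- stated objective: idiomatic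
-- what changed: A's split-on-dot / enumerate / inner-split / join accumulator loop is replaced by a single regular-expression substitution that rewrites each dot-prefixed key segment into bracketed dict-access form in one left-to-right pass.
import Mathlib
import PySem

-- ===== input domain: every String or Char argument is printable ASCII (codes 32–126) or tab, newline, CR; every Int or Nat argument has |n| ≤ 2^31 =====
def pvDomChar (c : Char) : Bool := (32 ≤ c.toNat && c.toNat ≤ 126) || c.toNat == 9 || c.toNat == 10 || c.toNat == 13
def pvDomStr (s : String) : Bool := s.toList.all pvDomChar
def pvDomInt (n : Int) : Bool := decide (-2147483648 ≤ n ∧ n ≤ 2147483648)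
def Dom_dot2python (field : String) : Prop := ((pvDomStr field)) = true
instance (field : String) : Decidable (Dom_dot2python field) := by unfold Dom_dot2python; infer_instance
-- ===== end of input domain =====

-- B replaces A's split/enumerate/join loop by a single regex substitution (idiomatic one-liner); return values proved equal on all inputs.

-- ===== PORT A =====
def dot2python (field : String) : String :=
  -- field.split('.') — separator nonempty, Chars.splitOn is the exact form of str.split
  let segs : List (List Char) := PySem.Chars.splitOn field.toList ['.']
  let z : List (List Char) :=
    (PySem.List.enumerate segs).foldl (fun z p =>
      if p.1 == 0 then z ++ [p.2]
      else
        let item_split := PySem.Chars.splitOn p.2 ['[']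
        -- item_split[0] : str.split always returns a nonempty list, so index 0 is its head
        let key0 := item_split.headD []
        -- '["{}"]'.format(item_split[0])
        let key := ['[', '"'] ++ key0 ++ ['"', ']']
        let z := z ++ [key]
        if item_split.length > 1 then z ++ [PySem.Chars.slice p.2 (some (key0.length : Int)) none] else z) []
  String.ofList (PySem.Chars.join [] z)

-- ===== PORT B =====
-- [^.\[] of the regex key class
def pvKeyChar (c : Char) : Bool := c != '.' && c != '['

-- hand port of re.sub(r'\.([^.\[]*)', r'["\1"]', field): a left-to-right scan that, at each
-- '.', emits '["' ++ the following key run ++ '"]' and resumes after the run, copying every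
-- other character verbatim — exact for this pattern (no overlapping/empty-match subtleties:
-- every match starts with the literal '.').
def pvSub : List Char → List Char
  | [] => []
  | c :: rest =>
    if c = '.' then
      ('[' :: '"' :: rest.takeWhile pvKeyChar) ++ ('"' :: ']' :: pvSub (rest.dropWhile pvKeyChar))
    else c :: pvSub rest
termination_by l => l.length
decreasing_by
  · exact Nat.lt_succ_of_le (List.length_dropWhile_le _ _)
  · simp

def dot2python_alt (field : String) : String :=
  String.ofList (pvSub field.toList)

-- ===== PRECONDITION & SPEC =====
def Spec_dot2python (field : String) (out : String) : Prop := out = dot2python_alt field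
instance (field : String) (out : String) : Decidable (Spec_dot2python field out) := by unfold Spec_dot2python; infer_instance

-- ===== CLAIM (what is proved, stated in full; the proofs are below) =====
def Claim_equal_dot2python : Prop := ∀ (field : String), Dom_dot2python field → Spec_dot2python field (dot2python field)

-- ===== LEMMAS AND PROOFS =====

-- reference splitter: Python's s.split(sep) for a single-character sep
def pvMySplit (sep : Char) : List Char → List (List Char)
  | [] => [[]]
  | c :: rest =>
    if c = sep then [] :: pvMySplit sep rest
    else
      match pvMySplit sep rest with
      | [] => [[c]]
      | h :: t => (c :: h) :: t

-- inverse of pvMySplit: rejoin the segments with sep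
def pvJoin (sep : Char) : List (List Char) → List Char
  | [] => []
  | h :: t => h ++ (t.map (fun s => sep :: s)).flatten

theorem pvMySplit_ne_nil (sep : Char) (cs : List Char) : pvMySplit sep cs ≠ [] := by
  cases cs with
  | nil => simp [pvMySplit]
  | cons c rest =>
    simp only [pvMySplit]
    split
    · simp
    · split <;> simp

theorem splitOn_go_eq (sep : Char) (cs : List Char) :
    ∀ (fuel : Nat), cs.length < fuel → ∀ (cur : List Char) (acc : List (List Char)),
    PySem.Chars.splitOn.go [sep] fuel cs cur acc
    = acc.reverse ++ (match pvMySplit sep cs with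
        | [] => [cur.reverse]
        | h :: t => (cur.reverse ++ h) :: t) := by
  induction cs with
  | nil =>
    intro fuel hf cur acc
    cases fuel with
    | zero => omega
    | succ f => simp [PySem.Chars.splitOn.go, pvMySplit]
  | cons c rest ih =>
    intro fuel hf cur acc
    cases fuel with
    | zero => omega
    | succ f =>
      obtain ⟨h, t, hm⟩ := List.exists_cons_of_ne_nil (pvMySplit_ne_nil sep rest)
      by_cases hc : c = sep
      · subst hc
        have hpre : List.isPrefixOf [c] (c :: rest) = true := by
          simp [List.isPrefixOf]
        rw [PySem.Chars.splitOn.go]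
        simp only [hpre, if_true]
        rw [show List.drop ([c].length) (c :: rest) = rest from rfl]
        rw [ih f (by simpa using hf) [] (cur.reverse :: acc)]
        simp [pvMySplit, hm]
      · have hpre : List.isPrefixOf [sep] (c :: rest) = false := by
          simp [List.isPrefixOf]
          exact fun hh => absurd hh.symm hc
        rw [PySem.Chars.splitOn.go]
        simp only [hpre]
        rw [if_neg (by simp)]
        rw [ih f (by simpa using hf) (c :: cur) acc]
        simp [pvMySplit, hc, hm]

theorem splitOn_eq (sep : Char) (cs : List Char) :
    PySem.Chars.splitOn cs [sep] = pvMySplit sep cs := by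
  obtain ⟨h, t, hm⟩ := List.exists_cons_of_ne_nil (pvMySplit_ne_nil sep cs)
  unfold PySem.Chars.splitOn
  rw [splitOn_go_eq sep cs (cs.length + 1) (by omega) [] []]
  simp [hm]

theorem pvJoin_mySplit (sep : Char) (cs : List Char) : pvJoin sep (pvMySplit sep cs) = cs := by
  induction cs with
  | nil => simp [pvMySplit, pvJoin]
  | cons c rest ih =>
    obtain ⟨h, t, hm⟩ := List.exists_cons_of_ne_nil (pvMySplit_ne_nil sep rest)
    by_cases hc : c = sep
    · subst hc
      simp only [pvMySplit, if_true, pvJoin]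
      rw [hm] at ih ⊢
      simp only [pvJoin] at ih
      simp [← ih]
    · simp only [pvMySplit, hc, if_false, hm] at *
      simp only [pvJoin] at ih ⊢
      simp [← ih]

theorem mySplit_no_sep (sep : Char) (cs : List Char) :
    ∀ s ∈ pvMySplit sep cs, sep ∉ s := by
  induction cs with
  | nil => simp [pvMySplit]
  | cons c rest ih =>
    obtain ⟨h, t, hm⟩ := List.exists_cons_of_ne_nil (pvMySplit_ne_nil sep rest)
    by_cases hc : c = sep
    · subst hc
      simp only [pvMySplit, if_true]
      intro s hs
      rcases List.mem_cons.mp hs with hs | hs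
      · simp [hs]
      · exact ih s hs
    · rw [hm] at ih
      simp only [pvMySplit, hc, if_false, hm]
      intro s hs
      rcases List.mem_cons.mp hs with hs | hs
      · subst hs
        intro hmem
        rcases List.mem_cons.mp hmem with hmem | hmem
        · exact hc hmem.symm
        · exact ih h (by simp) hmem
      · exact ih s (by simp [hs])

theorem mySplit_headD (sep : Char) (cs : List Char) :
    (pvMySplit sep cs).headD [] = cs.takeWhile (fun c => c != sep) := by
  induction cs with
  | nil => simp [pvMySplit]
  | cons c rest ih =>
    obtain ⟨h, t, hm⟩ := List.exists_cons_of_ne_nil (pvMySplit_ne_nil sep rest)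
    by_cases hc : c = sep
    · subst hc
      simp [pvMySplit]
    · rw [hm] at ih
      simp only [pvMySplit, hc, if_false, hm]
      simp only [List.headD_cons] at ih
      simp [hc, ← ih]

theorem mySplit_of_not_mem (sep : Char) (cs : List Char) (h : sep ∉ cs) :
    pvMySplit sep cs = [cs] := by
  induction cs with
  | nil => simp [pvMySplit]
  | cons c rest ih =>
    have hc : ¬ c = sep := fun hh => h (by simp [hh])
    have := ih (fun hh => h (by simp [hh]))
    simp [pvMySplit, hc, this]

theorem mySplit_length_of_mem (sep : Char) (cs : List Char) (h : sep ∈ cs) :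
    1 < (pvMySplit sep cs).length := by
  induction cs with
  | nil => simp at h
  | cons c rest ih =>
    obtain ⟨hh, t, hm⟩ := List.exists_cons_of_ne_nil (pvMySplit_ne_nil sep rest)
    by_cases hc : c = sep
    · have := List.length_pos_of_ne_nil (pvMySplit_ne_nil sep rest)
      simp only [pvMySplit, if_pos hc, List.length_cons]
      omega
    · have hr : sep ∈ rest := by
        rcases List.mem_cons.mp h with h | h
        · exact absurd h.symm hc
        · exact h
      have h2 := ih hr
      rw [hm] at h2
      simp only [List.length_cons] at h2
      simp only [pvMySplit, if_neg hc, hm, List.length_cons]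
      omega

-- the flattened contribution of one post-dot segment (shared normal form of both sides)
def pvWrap (seg : List Char) : List Char :=
  ('[' :: '"' :: seg.takeWhile pvKeyChar) ++ ('"' :: ']' :: seg.drop (seg.takeWhile pvKeyChar).length)

-- ===== A-side reduction =====

-- the chunks A's loop appends for one post-dot segment
def pvPiecesA (seg : List Char) : List (List Char) :=
  let item_split := pvMySplit '[' seg
  let key0 := item_split.headD []
  let key := ['[', '"'] ++ key0 ++ ['"', ']']
  if item_split.length > 1 then [key, PySem.Chars.slice seg (some (key0.length : Int)) none] else [key]

theorem takeWhile_key_eq (seg : List Char) (h : '.' ∉ seg) :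
    seg.takeWhile (fun c => c != '[') = seg.takeWhile pvKeyChar := by
  induction seg with
  | nil => simp
  | cons c s ih =>
    have hc : ¬ c = '.' := fun hh => h (by simp [hh])
    have ih' := ih (fun hh => h (by simp [hh]))
    by_cases hb : c = '['
    · simp [hb, pvKeyChar]
    · simp [hb, hc, pvKeyChar, ih']

theorem piecesA_flatten (seg : List Char) (h : '.' ∉ seg) :
    (pvPiecesA seg).flatten = pvWrap seg := by
  by_cases hb : '[' ∈ seg
  · have hlen := mySplit_length_of_mem '[' seg hb
    simp only [pvPiecesA, mySplit_headD, if_pos hlen]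
    simp only [PySem.Chars.slice_eq_listSlice, PySem.List.slice_from_natCast]
    simp [pvWrap, takeWhile_key_eq seg h]
  · have hsp := mySplit_of_not_mem '[' seg hb
    have htw : seg.takeWhile pvKeyChar = seg := by
      rw [List.takeWhile_eq_self_iff]
      intro x hx
      have hx1 : ¬ x = '.' := fun hh => h (hh ▸ hx)
      have hx2 : ¬ x = '[' := fun hh => hb (hh ▸ hx)
      simp [pvKeyChar, hx1, hx2]
    simp only [pvPiecesA, hsp]
    simp [pvWrap, htw, List.drop_length]

theorem foldA (t : List (List Char)) :
    ∀ (k : Int), 1 ≤ k → ∀ (z0 : List (List Char)),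
    (PySem.List.enumerate t k).foldl (fun z p =>
      if p.1 == 0 then z ++ [p.2]
      else
        if (PySem.Chars.splitOn p.2 ['[']).length > 1 then
          z ++ [['[', '"'] ++ (PySem.Chars.splitOn p.2 ['[']).headD [] ++ ['"', ']']] ++
            [PySem.Chars.slice p.2 (some (((PySem.Chars.splitOn p.2 ['[']).headD []).length : Int))]
        else z ++ [['[', '"'] ++ (PySem.Chars.splitOn p.2 ['[']).headD [] ++ ['"', ']']]) z0
    = z0 ++ (t.map pvPiecesA).flatten := by
  induction t with
  | nil => intro k hk z0; simp [PySem.List.enumerate]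
  | cons seg t ih =>
    intro k hk z0
    rw [PySem.List.enumerate, List.foldl_cons]
    have hk0 : (k == 0) = false := by
      rw [beq_eq_false_iff_ne]
      omega
    rw [ih (k + 1) (by omega)]
    simp only [hk0, Bool.false_eq_true, if_false, splitOn_eq]
    simp only [List.map_cons, List.flatten_cons, pvPiecesA]
    split
    · simp
    · simp

-- ===== B-side reduction =====

theorem pvSub_copy (s : List Char) (h : '.' ∉ s) (r : List Char) :
    pvSub (s ++ r) = s ++ pvSub r := by
  induction s with
  | nil => simp
  | cons c s ih =>
    have hc : ¬ c = '.' := fun hh => h (by simp [hh])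
    rw [List.cons_append, pvSub, if_neg hc, ih (fun hh => h (by simp [hh])), List.cons_append]

theorem takeWhile_key_append (seg : List Char) (h : '.' ∉ seg) (r : List Char)
    (hr : r = [] ∨ ∃ r', r = '.' :: r') :
    (seg ++ r).takeWhile pvKeyChar = seg.takeWhile pvKeyChar := by
  induction seg with
  | nil =>
    rcases hr with rfl | ⟨r', rfl⟩
    · simp
    · simp [pvKeyChar]
  | cons c s ih =>
    have ih' := ih (fun hh => h (by simp [hh]))
    by_cases hk : pvKeyChar c = true
    · simp [hk, ih']
    · simp [hk]

theorem dropWhile_key_append (seg : List Char) (h : '.' ∉ seg) (r : List Char)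
    (hr : r = [] ∨ ∃ r', r = '.' :: r') :
    (seg ++ r).dropWhile pvKeyChar = seg.drop (seg.takeWhile pvKeyChar).length ++ r := by
  induction seg with
  | nil =>
    rcases hr with rfl | ⟨r', rfl⟩
    · simp
    · simp [pvKeyChar]
  | cons c s ih =>
    have ih' := ih (fun hh => h (by simp [hh]))
    by_cases hk : pvKeyChar c = true
    · simp [hk, ih']
    · simp [hk]

theorem pvSub_dot (seg : List Char) (h : '.' ∉ seg) (r : List Char)
    (hr : r = [] ∨ ∃ r', r = '.' :: r') :
    pvSub ('.' :: (seg ++ r)) = pvWrap seg ++ pvSub r := by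
  rw [pvSub, if_pos rfl]
  rw [takeWhile_key_append seg h r hr, dropWhile_key_append seg h r hr]
  rw [pvSub_copy _ (fun hm => h (List.mem_of_mem_drop hm)) r]
  simp [pvWrap]

theorem pvSub_main (t : List (List Char)) (ht : ∀ s ∈ t, '.' ∉ s)
    (s0 : List Char) (h0 : '.' ∉ s0) :
    pvSub (s0 ++ (t.map (fun s => '.' :: s)).flatten) = s0 ++ (t.map pvWrap).flatten := by
  induction t generalizing s0 with
  | nil =>
    have h1 := pvSub_copy s0 h0 []
    have h2 : pvSub ([] : List Char) = [] := by rw [pvSub]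
    simp only [List.append_nil, h2] at h1
    simpa using h1
  | cons seg t ih =>
    have hseg : '.' ∉ seg := ht seg (by simp)
    have ht' : ∀ s ∈ t, '.' ∉ s := fun s hs => ht s (by simp [hs])
    have hr : (t.map (fun s => '.' :: s)).flatten = []
        ∨ ∃ r', (t.map (fun s => '.' :: s)).flatten = '.' :: r' := by
      cases t with
      | nil => left; simp
      | cons a b => right; exact ⟨a ++ (b.map (fun s => '.' :: s)).flatten, by simp⟩
    have key : pvSub (s0 ++ (('.' :: seg) ++ (t.map (fun s => '.' :: s)).flatten))
        = s0 ++ pvWrap seg ++ (t.map pvWrap).flatten := by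
      rw [pvSub_copy s0 h0]
      rw [List.cons_append, pvSub_dot seg hseg _ hr]
      have := ih ht' [] (by simp)
      simp only [List.nil_append] at this
      rw [this]
      simp
    simpa using key

-- ===== glue =====

theorem join_nil_flatten (z : List (List Char)) : PySem.Chars.join [] z = z.flatten := by
  induction z with
  | nil => simp [PySem.Chars.join_nil]
  | cons h t ih =>
    cases t with
    | nil => simp [PySem.Chars.join_singleton]
    | cons h2 t2 =>
      rw [PySem.Chars.join_cons_cons]
      rw [ih]
      simp

theorem flatten_flatten_map (t : List (List Char)) (f : List Char → List (List Char)) :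
    ((t.map f).flatten).flatten = (t.map (fun s => (f s).flatten)).flatten := by
  induction t with
  | nil => simp
  | cons a t ih => simp [ih]

-- ===== VERDICT (by name: the statement is the Claim_ definition above) =====
theorem dot2python_spec : Claim_equal_dot2python := by
  unfold Claim_equal_dot2python
  intro field _
  unfold Spec_dot2python
  simp only [dot2python, dot2python_alt]
  obtain ⟨s0, t, hm⟩ := List.exists_cons_of_ne_nil (pvMySplit_ne_nil '.' field.toList)
  have hdotfree : ∀ s ∈ s0 :: t, '.' ∉ s := by
    rw [← hm]; exact mySplit_no_sep '.' field.toList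
  have hcs : field.toList = s0 ++ (t.map (fun s => '.' :: s)).flatten := by
    have hj := pvJoin_mySplit '.' field.toList
    rw [hm] at hj
    simpa [pvJoin] using hj.symm
  rw [splitOn_eq, hm]
  rw [PySem.List.enumerate, List.foldl_cons]
  simp only [beq_self_eq_true, if_true, List.nil_append]
  rw [foldA t (0 + 1) (by norm_num) [s0]]
  rw [join_nil_flatten]
  rw [List.cons_append, List.nil_append, List.flatten_cons]
  rw [flatten_flatten_map]
  rw [List.map_congr_left (fun s hs => piecesA_flatten s (hdotfree s (by simp [hs])))]
  conv_rhs => rw [hcs]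
  rw [pvSub_main t (fun s hs => hdotfree s (by simp [hs])) s0 (hdotfree s0 (by simp))]
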